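-- pv_equiv track=rewrite | github.com/CCheZi/Generative-Plagiarism-Detection | main.py | merge_blocks
-- ===== SOURCE A (Python) =====
-- def merge_blocks(matched_pairs, max_susp_gap=5, max_src_gap=5, min_block_size=2):
--     if not matched_pairs:
--         return []
--     matched_pairs.sort()
--     merged = []
--     current_block = [matched_pairs[0]]
--     for i in range(1, len(matched_pairs)):
--         prev_susp, prev_src = current_block[-1]
--         curr_susp, curr_src = matched_pairs[i]
--         if (
--             (curr_susp - prev_susp <= max_susp_gap)
--             and (abs(curr_src - prev_src) <= max_src_gap)
--             and (curr_susp > prev_susp and curr_src > prev_src)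
--         ):
--             current_block.append((curr_susp, curr_src))
--         else:
--             if len(current_block) >= min_block_size:
--                 merged.append(current_block)
--             current_block = [matched_pairs[i]]
--     if len(current_block) >= min_block_size:
--         merged.append(current_block)
--     return merged
-- ===== SOURCE B (Python) =====
-- def merge_blocks(matched_pairs, max_susp_gap=5, max_src_gap=5, min_block_size=2):
--     matched_pairs.sort()
--
--     def chain(p, q):
--         return (q[0] - p[0] <= max_susp_gap
--                 and abs(q[1] - p[1]) <= max_src_gap
--                 and q[0] > p[0] and q[1] > p[1])
--
--     def runs(pairs):
--         # divide and conquer: maximal chained runs of each half, joined at the boundary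
--         if len(pairs) <= 1:
--             return [pairs] if pairs else []
--         mid = len(pairs) // 2
--         left, right = runs(pairs[:mid]), runs(pairs[mid:])
--         if chain(left[-1][-1], right[0][0]):
--             return left[:-1] + [left[-1] + right[0]] + right[1:]
--         return left + right
--
--     return [r for r in runs(matched_pairs) if len(r) >= min_block_size]
-- ===== Notes on version B (the rewrite author's own statement) =====
-- stated objective: alternative
-- what changed: Replaces A's single forward accumulate-and-flush loop by a divide-and-conquer recursion: split the sorted list in halves, compute the maximal chained runs of each half, join the two boundary runs when the chain condition holds across the split, then filter by min_block_size in a separate pass.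
import Mathlib
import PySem

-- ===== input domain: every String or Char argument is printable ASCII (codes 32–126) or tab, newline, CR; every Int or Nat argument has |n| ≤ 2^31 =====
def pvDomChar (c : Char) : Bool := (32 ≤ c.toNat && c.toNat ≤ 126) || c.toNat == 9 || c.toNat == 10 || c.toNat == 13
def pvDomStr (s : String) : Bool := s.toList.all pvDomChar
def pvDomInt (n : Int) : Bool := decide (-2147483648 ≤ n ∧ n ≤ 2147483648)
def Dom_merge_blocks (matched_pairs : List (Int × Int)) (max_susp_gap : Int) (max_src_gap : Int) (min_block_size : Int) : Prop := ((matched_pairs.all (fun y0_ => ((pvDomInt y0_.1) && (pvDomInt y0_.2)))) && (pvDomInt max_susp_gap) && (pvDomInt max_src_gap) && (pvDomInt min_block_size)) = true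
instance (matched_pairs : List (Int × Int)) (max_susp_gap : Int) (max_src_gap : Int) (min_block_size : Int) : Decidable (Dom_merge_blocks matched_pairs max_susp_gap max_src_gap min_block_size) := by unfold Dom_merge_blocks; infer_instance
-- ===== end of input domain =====

-- B replaces A's forward accumulate-and-flush loop by a divide-and-conquer recursion (runs of each
-- half of the sorted list, joined at the split when the chain condition holds) plus a separate
-- min_block_size filter pass; same return value everywhere.  Both Pythons sort matched_pairs in
-- place (identical mutation); the equivalence proved here is about the return value.

-- The chain condition, the identical condition of both Python sources.
def pvChain (g1 g2 : Int) (p q : Int × Int) : Bool :=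
  decide (q.1 - p.1 ≤ g1) && decide (|q.2 - p.2| ≤ g2) && (decide (q.1 > p.1) && decide (q.2 > p.2))

-- ===== PORT A =====
-- the body of A's `for i in range(1, len(matched_pairs))` loop; state = (merged, current_block)
def pvStepA (g1 g2 m : Int) (st : List (List (Int × Int)) × List (Int × Int)) (curr : Int × Int) :
    List (List (Int × Int)) × List (Int × Int) :=
  let prev := PySem.List.pyGetD st.2 (-1) ((0 : Int), (0 : Int))  -- current_block[-1]; never empty
  if pvChain g1 g2 prev curr then (st.1, st.2 ++ [curr])
  else ((if m ≤ (st.2.length : Int) then st.1 ++ [st.2] else st.1), [curr])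

def merge_blocks (matched_pairs : List (Int × Int)) (max_susp_gap : Int) (max_src_gap : Int) (min_block_size : Int) : List (List (Int × Int)) :=
  if matched_pairs = [] then []
  else
    -- matched_pairs.sort(): Python's lexicographic tuple sort
    let s := PySem.List.sorted2 matched_pairs (fun p => p.1) (fun p => p.2)
    let st := (PySem.List.pyRange 1 (s.length : Int) 1).foldl
      (fun st i => pvStepA max_susp_gap max_src_gap min_block_size st
        (PySem.List.pyGetD s i ((0 : Int), (0 : Int))))
      (([] : List (List (Int × Int))), [PySem.List.pyGetD s 0 ((0 : Int), (0 : Int))])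
    if min_block_size ≤ (st.2.length : Int) then st.1 ++ [st.2] else st.1

-- ===== PORT B =====
-- B's recursive helper `runs(pairs)`: fuel (≥ length at the call site) only makes the structural
-- recursion evident; the `[]`/`[p]` patterns are Python's `if len(pairs) <= 1` base case, and
-- left[-1], right[0], left[-1][-1], right[0][0] are read with defaults (never empty there).
def pvRunsDC (g1 g2 : Int) (fuel : Nat) (pairs : List (Int × Int)) : List (List (Int × Int)) :=
  match fuel, pairs with
  | _, [] => []
  | _, [p] => [[p]]
  | 0, _ => []   -- unreachable: fuel ≥ length at every call
  | fuel+1, pairs =>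
    let mid := pairs.length / 2
    let left := pvRunsDC g1 g2 fuel (pairs.take mid)    -- pairs[:mid] (0 ≤ mid ≤ len: exact)
    let right := pvRunsDC g1 g2 fuel (pairs.drop mid)   -- pairs[mid:]
    if pvChain g1 g2 ((left.getLastD []).getLastD ((0 : Int), (0 : Int)))
        ((right.headD []).headD ((0 : Int), (0 : Int)))
    then (left.dropLast ++ [left.getLastD [] ++ right.headD []]) ++ right.tail
    else left ++ right

def merge_blocks_alt (matched_pairs : List (Int × Int)) (max_susp_gap : Int) (max_src_gap : Int) (min_block_size : Int) : List (List (Int × Int)) :=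
  -- matched_pairs.sort()
  let s := PySem.List.sorted2 matched_pairs (fun p => p.1) (fun p => p.2)
  -- [r for r in runs(s) if len(r) >= min_block_size]
  (pvRunsDC max_susp_gap max_src_gap s.length s).filter
    (fun r => decide (min_block_size ≤ (r.length : Int)))

-- ===== PRECONDITION & SPEC =====
def Spec_merge_blocks (matched_pairs : List (Int × Int)) (max_susp_gap : Int) (max_src_gap : Int) (min_block_size : Int) (out : List (List (Int × Int))) : Prop := out = merge_blocks_alt matched_pairs max_susp_gap max_src_gap min_block_size
instance (matched_pairs : List (Int × Int)) (max_susp_gap : Int) (max_src_gap : Int) (min_block_size : Int) (out : List (List (Int × Int))) : Decidable (Spec_merge_blocks matched_pairs max_susp_gap max_src_gap min_block_size out) := by unfold Spec_merge_blocks; infer_instance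

-- ===== CLAIM =====
def Claim_equal_merge_blocks : Prop := ∀ (matched_pairs : List (Int × Int)) (max_susp_gap : Int) (max_src_gap : Int) (min_block_size : Int), Dom_merge_blocks matched_pairs max_susp_gap max_src_gap min_block_size → Spec_merge_blocks matched_pairs max_susp_gap max_src_gap min_block_size (merge_blocks matched_pairs max_susp_gap max_src_gap min_block_size)

-- ===== LEMMAS AND PROOFS =====

-- Reference: the maximal chain decomposition of a list, by recursion on its head.
def pvRuns (g1 g2 : Int) : List (Int × Int) → List (List (Int × Int))
  | [] => []
  | p :: rest =>
    match pvRuns g1 g2 rest with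
    | [] => [[p]]
    | b :: bs => if pvChain g1 g2 p b.headI then (p :: b) :: bs else [p] :: b :: bs

-- The same decomposition accumulated front-to-back (A's traversal order); lastp = last of b.
def pvRunsF (g1 g2 : Int) (b : List (Int × Int)) (lastp : Int × Int) :
    List (Int × Int) → List (List (Int × Int))
  | [] => [b]
  | q :: rest =>
    if pvChain g1 g2 lastp q then pvRunsF g1 g2 (b ++ [q]) q rest
    else b :: pvRunsF g1 g2 [q] q rest

-- the boundary join of B's conquer step, as a named function (used only by the proofs)
def pvMergeB (g1 g2 : Int) (L R : List (List (Int × Int))) : List (List (Int × Int)) :=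
  if pvChain g1 g2 ((L.getLastD []).getLastD ((0 : Int), (0 : Int)))
      ((R.headD []).headD ((0 : Int), (0 : Int)))
  then (L.dropLast ++ [L.getLastD [] ++ R.headD []]) ++ R.tail
  else L ++ R

lemma pvRuns_cons (g1 g2 : Int) (p : Int × Int) (rest : List (Int × Int)) :
    ∃ t bs, pvRuns g1 g2 (p :: rest) = (p :: t) :: bs := by
  cases h : pvRuns g1 g2 rest with
  | nil => exact ⟨[], [], by simp [pvRuns, h]⟩
  | cons b bs =>
    by_cases hc : pvChain g1 g2 p b.headI
    · exact ⟨b, bs, by simp [pvRuns, h, hc]⟩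
    · exact ⟨[], b :: bs, by simp [pvRuns, h, hc]⟩

lemma pvRunsF_eq (g1 g2 : Int) : ∀ (l b : List (Int × Int)) (lastp : Int × Int),
    pvRunsF g1 g2 b lastp l =
      match pvRuns g1 g2 l with
      | [] => [b]
      | r :: rs => if pvChain g1 g2 lastp r.headI then (b ++ r) :: rs else b :: r :: rs := by
  intro l
  induction l with
  | nil => intro b lastp; simp [pvRunsF, pvRuns]
  | cons q rest ih =>
    intro b lastp
    cases h : pvRuns g1 g2 rest with
    | nil => by_cases hc : pvChain g1 g2 lastp q <;> simp [pvRunsF, pvRuns, h, hc, ih]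
    | cons r rs =>
      by_cases hc : pvChain g1 g2 lastp q <;>
        by_cases hc2 : pvChain g1 g2 q r.headI <;>
          simp [pvRunsF, pvRuns, h, hc, hc2, ih]

lemma pvRunsF_singleton (g1 g2 : Int) (p : Int × Int) (l : List (Int × Int)) :
    pvRunsF g1 g2 [p] p l = pvRuns g1 g2 (p :: l) := by
  rw [pvRunsF_eq]
  cases h : pvRuns g1 g2 l with
  | nil => simp [pvRuns, h]
  | cons r rs => by_cases hc : pvChain g1 g2 p r.headI <;> simp [pvRuns, h, hc]

-- A's loop, with inline flush-filtering and a final flush, computes the filtered runs.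
lemma foldA (g1 g2 m : Int) : ∀ (l : List (Int × Int)) (merged : List (List (Int × Int)))
    (cur : List (Int × Int)) (lastp : Int × Int), cur.getLast? = some lastp →
    (if m ≤ (((l.foldl (pvStepA g1 g2 m) (merged, cur))).2.length : Int)
     then (l.foldl (pvStepA g1 g2 m) (merged, cur)).1 ++ [(l.foldl (pvStepA g1 g2 m) (merged, cur)).2]
     else (l.foldl (pvStepA g1 g2 m) (merged, cur)).1)
    = merged ++ (pvRunsF g1 g2 cur lastp l).filter (fun bl => decide (m ≤ (bl.length : Int))) := by
  intro l
  induction l with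
  | nil =>
    intro merged cur lastp _
    simp only [List.foldl_nil, pvRunsF, List.filter]
    by_cases hm : m ≤ (cur.length : Int) <;> simp [hm]
  | cons q rest ih =>
    intro merged cur lastp h
    have hne : cur ≠ [] := by rintro rfl; simp at h
    have hlast : cur.getLast hne = lastp := by
      have := List.getLast?_eq_some_getLast (l := cur) hne
      rw [this] at h; exact Option.some.inj h
    have hstep : pvStepA g1 g2 m (merged, cur) q =
        if pvChain g1 g2 lastp q then (merged, cur ++ [q])
        else ((if m ≤ (cur.length : Int) then merged ++ [cur] else merged), [q]) := by
      simp [pvStepA, PySem.List.pyGetD_neg_one _ _ hne, hlast]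
    by_cases hc : pvChain g1 g2 lastp q
    · rw [List.foldl_cons, hstep, if_pos hc,
        ih (merged) (cur ++ [q]) q List.getLast?_concat]
      simp [pvRunsF, hc]
    · rw [List.foldl_cons, hstep, if_neg hc,
        ih _ [q] q (by simp)]
      simp only [pvRunsF, hc, Bool.false_eq_true, ite_false, List.filter]
      by_cases hm : m ≤ (cur.length : Int) <;> simp [hm, List.append_assoc]

-- getLastD after one cons step no longer depends on the default; used throughout below
lemma pvMergeB_cons_run (g1 g2 : Int) (p : Int × Int) (b : List (Int × Int)) (hb : b ≠ [])
    (bs R : List (List (Int × Int))) :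
    pvMergeB g1 g2 ((p :: b) :: bs) R =
      match pvMergeB g1 g2 (b :: bs) R with
      | [] => []
      | r :: rs => (p :: r) :: rs := by
  cases b with
  | nil => exact absurd rfl hb
  | cons x xs =>
    cases bs with
    | nil =>
      simp only [pvMergeB, List.getLastD_cons, List.getLastD_nil]
      split_ifs <;> simp
    | cons c bs' =>
      simp only [pvMergeB, List.getLastD_cons]
      split_ifs <;> simp

lemma pvMergeB_cons_single (g1 g2 : Int) (p : Int × Int) (L R : List (List (Int × Int)))
    (hL : L ≠ []) : pvMergeB g1 g2 ([p] :: L) R = [p] :: pvMergeB g1 g2 L R := by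
  cases L with
  | nil => exact absurd rfl hL
  | cons c bs =>
    simp only [pvMergeB, List.getLastD_cons]
    split_ifs <;> simp

-- the head recursion pvRuns splits along any concatenation of nonempty parts
lemma pvRuns_append (g1 g2 : Int) (v : List (Int × Int)) (hv : v ≠ []) :
    ∀ (u : List (Int × Int)), u ≠ [] →
    pvRuns g1 g2 (u ++ v) = pvMergeB g1 g2 (pvRuns g1 g2 u) (pvRuns g1 g2 v) := by
  intro u
  induction u with
  | nil => intro h; exact absurd rfl h
  | cons p u' ih =>
    intro _
    cases u' with
    | nil =>
      obtain ⟨q, v', rfl⟩ : ∃ q v', v = q :: v' := by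
        cases v with | nil => exact absurd rfl hv | cons q v' => exact ⟨q, v', rfl⟩
      obtain ⟨t, bs, hrv⟩ := pvRuns_cons g1 g2 q v'
      have hone : pvRuns g1 g2 [p] = [[p]] := rfl
      have hunf : pvRuns g1 g2 (p :: q :: v') =
          match pvRuns g1 g2 (q :: v') with
          | [] => [[p]]
          | b :: bs => if pvChain g1 g2 p b.headI then (p :: b) :: bs else [p] :: b :: bs := rfl
      rw [show ([p] ++ q :: v') = p :: q :: v' from rfl, hunf, hone, hrv]
      by_cases hc : pvChain g1 g2 p q
      · simp [pvMergeB, hc]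
      · simp [pvMergeB, hc]
    | cons a u'' =>
      obtain ⟨t, bs, hru⟩ := pvRuns_cons g1 g2 a u''
      obtain ⟨s, cs, hruv⟩ := pvRuns_cons g1 g2 a (u'' ++ v)
      have hIH := ih (by simp)
      rw [List.cons_append, hru] at hIH
      have hunfL : pvRuns g1 g2 (p :: a :: u'') =
          match pvRuns g1 g2 (a :: u'') with
          | [] => [[p]]
          | b :: bs => if pvChain g1 g2 p b.headI then (p :: b) :: bs else [p] :: b :: bs := rfl
      have hunfLHS : pvRuns g1 g2 (p :: (a :: (u'' ++ v))) =
          match pvRuns g1 g2 (a :: (u'' ++ v)) with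
          | [] => [[p]]
          | b :: bs => if pvChain g1 g2 p b.headI then (p :: b) :: bs else [p] :: b :: bs := rfl
      by_cases hc : pvChain g1 g2 p a
      · have hL : pvRuns g1 g2 (p :: a :: u'') = (p :: a :: t) :: bs := by
          rw [hunfL, hru]; simp [hc]
        have hLHS : pvRuns g1 g2 ((p :: a :: u'') ++ v) = (p :: a :: s) :: cs := by
          rw [List.cons_append, List.cons_append, hunfLHS, hruv]; simp [hc]
        rw [hLHS, hL, pvMergeB_cons_run g1 g2 p (a :: t) (by simp) bs (pvRuns g1 g2 v),
          ← hIH, hruv]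
      · have hL : pvRuns g1 g2 (p :: a :: u'') = [p] :: (a :: t) :: bs := by
          rw [hunfL, hru]; simp [hc]
        have hLHS : pvRuns g1 g2 ((p :: a :: u'') ++ v) = [p] :: (a :: s) :: cs := by
          rw [List.cons_append, List.cons_append, hunfLHS, hruv]; simp [hc]
        rw [hLHS, hL, pvMergeB_cons_single g1 g2 p ((a :: t) :: bs) (pvRuns g1 g2 v) (by simp),
          ← hIH, hruv]

-- the divide-and-conquer recursion computes pvRuns (any fuel ≥ length - 1)
lemma pvRunsDC_eq (g1 g2 : Int) : ∀ (fuel : Nat) (l : List (Int × Int)),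
    l.length ≤ fuel + 1 → pvRunsDC g1 g2 fuel l = pvRuns g1 g2 l := by
  intro fuel
  induction fuel with
  | zero =>
    intro l hl
    match l, hl with
    | [], _ => simp [pvRunsDC, pvRuns]
    | [p], _ => simp [pvRunsDC, pvRuns]
  | succ fuel ih =>
    intro l hl
    match l with
    | [] => simp [pvRunsDC, pvRuns]
    | [p] => simp [pvRunsDC, pvRuns]
    | x :: y :: zs =>
      have hlen : (x :: y :: zs).length = zs.length + 2 := by simp
      have hmid1 : 1 ≤ (x :: y :: zs).length / 2 := by omega
      have hmid2 : (x :: y :: zs).length / 2 < (x :: y :: zs).length := by omega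
      have htake : ((x :: y :: zs).take ((x :: y :: zs).length / 2)).length
          = (x :: y :: zs).length / 2 := by
        simp [List.length_take]; omega
      have hdrop : ((x :: y :: zs).drop ((x :: y :: zs).length / 2)).length
          = (x :: y :: zs).length - (x :: y :: zs).length / 2 := by
        simp [List.length_drop]
      have htne : (x :: y :: zs).take ((x :: y :: zs).length / 2) ≠ [] := by
        intro h; rw [← List.length_eq_zero_iff] at h; omega
      have hdne : (x :: y :: zs).drop ((x :: y :: zs).length / 2) ≠ [] := by
        intro h; rw [← List.length_eq_zero_iff] at h; omega
      rw [show pvRunsDC g1 g2 (fuel + 1) (x :: y :: zs) =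
            pvMergeB g1 g2
              (pvRunsDC g1 g2 fuel ((x :: y :: zs).take ((x :: y :: zs).length / 2)))
              (pvRunsDC g1 g2 fuel ((x :: y :: zs).drop ((x :: y :: zs).length / 2)))
          from rfl,
        ih _ (by omega), ih _ (by omega),
        ← pvRuns_append g1 g2 _ hdne _ htne, List.take_append_drop]

-- both programs compute the filtered runs of the same sorted list
lemma both_eq_runs (mp : List (Int × Int)) (g1 g2 m : Int) :
    merge_blocks mp g1 g2 m = merge_blocks_alt mp g1 g2 m := by
  by_cases hmp : mp = []
  · subst hmp
    have hs : PySem.List.sorted2 ([] : List (Int × Int)) (fun p => p.1) (fun p => p.2) = [] := by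
      have := PySem.List.sorted2_perm ([] : List (Int × Int)) (fun p => p.1) (fun p => p.2) false
      exact this.eq_nil
    simp [merge_blocks, merge_blocks_alt, hs, pvRunsDC]
  · unfold merge_blocks merge_blocks_alt
    rw [if_neg hmp]
    have hsne : PySem.List.sorted2 mp (fun p => p.1) (fun p => p.2) ≠ [] := by
      intro h
      have := PySem.List.sorted2_perm mp (fun p => p.1) (fun p => p.2) false
      rw [h] at this
      exact hmp (this.symm.eq_nil)
    simp only []
    cases hs : PySem.List.sorted2 mp (fun p => p.1) (fun p => p.2) with
    | nil => exact absurd hs hsne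
    | cons x t =>
      rw [PySem.List.foldl_pyRange_pyGetD' (x :: t) ((0 : Int), (0 : Int))
        (pvStepA g1 g2 m) _ (by norm_num)]
      simp only [PySem.List.pyGetD_zero_cons, Int.toNat_one, List.drop_succ_cons, List.drop_zero]
      rw [foldA g1 g2 m t [] [x] x (by simp), pvRunsF_singleton,
        pvRunsDC_eq g1 g2 (x :: t).length (x :: t) (by omega)]
      simp

-- ===== VERDICT =====
theorem merge_blocks_spec : Claim_equal_merge_blocks := by
  intro mp g1 g2 m _
  unfold Spec_merge_blocks
  exact both_eq_runs mp g1 g2 m
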